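-- pv_equiv track=rewrite | github.com/peterwilli/Endless-AWSW | EndlessServer/src/reply_processor.py | has_unclosed_or_nested_brackets
-- ===== SOURCE A (Python) =====
-- def has_unclosed_or_nested_brackets(text) -> bool:
--     is_ok = True
--     for char in text:
--         if char == '[':
--             if is_ok:
--                 is_ok = False
--             else:
--                 return True
--         elif char == ']':
--             if is_ok:
--                 return True
--             else:
--                 is_ok = True
--     return not is_ok
-- ===== SOURCE B (Python) =====
-- def has_unclosed_or_nested_brackets(text) -> bool:
--     brackets = [c for c in text if c == '[' or c == ']']
--     n = len(brackets)
--     return n % 2 == 1 or brackets != ['[', ']'] * (n // 2)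
-- ===== Notes on version B (the rewrite author's own statement) =====
-- stated objective: simpler
-- what changed: B extracts the bracket subsequence once and compares it against the closed pattern of an open-close pair repeated (plus an odd-length check), instead of A's running open/closed flag with early returns.
import Mathlib
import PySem

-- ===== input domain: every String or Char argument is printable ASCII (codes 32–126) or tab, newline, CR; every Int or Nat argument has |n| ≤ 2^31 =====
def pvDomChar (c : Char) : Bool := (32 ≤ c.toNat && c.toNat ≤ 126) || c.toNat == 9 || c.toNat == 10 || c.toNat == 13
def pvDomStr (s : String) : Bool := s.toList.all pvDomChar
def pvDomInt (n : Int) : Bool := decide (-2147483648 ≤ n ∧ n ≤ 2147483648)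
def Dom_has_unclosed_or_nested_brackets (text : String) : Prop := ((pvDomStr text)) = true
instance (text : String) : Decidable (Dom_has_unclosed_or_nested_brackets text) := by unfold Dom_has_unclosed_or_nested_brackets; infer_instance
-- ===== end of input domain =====

-- B replaces A's running open/closed flag with a one-pass bracket extraction followed by a
-- closed pattern comparison (odd count, or not the open-close pair repeated); objective: simpler.

-- ===== PORT A =====
-- the for-loop of A with its early returns, as structural recursion over the characters
def pvLoopA : List Char → Bool → Bool
  | [], is_ok => !is_ok
  | c :: cs, is_ok =>
    if c = '[' then
      (if is_ok then pvLoopA cs false else true)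
    else if c = ']' then
      (if is_ok then true else pvLoopA cs true)
    else pvLoopA cs is_ok

def has_unclosed_or_nested_brackets (text : String) : Bool :=
  pvLoopA text.toList true

-- ===== PORT B =====
def has_unclosed_or_nested_brackets_alt (text : String) : Bool :=
  let brackets := text.toList.filter (fun c => c == '[' || c == ']')
  let n := brackets.length
  decide (n % 2 = 1) || decide (brackets ≠ (List.replicate (n / 2) ['[', ']']).flatten)

-- ===== PRECONDITION & SPEC =====
def Spec_has_unclosed_or_nested_brackets (text : String) (out : Bool) : Prop := out = has_unclosed_or_nested_brackets_alt text
instance (text : String) (out : Bool) : Decidable (Spec_has_unclosed_or_nested_brackets text out) := by unfold Spec_has_unclosed_or_nested_brackets; infer_instance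

-- ===== CLAIM (what is proved, stated in full; the proofs are below) =====
def Claim_equal_has_unclosed_or_nested_brackets : Prop := ∀ (text : String), Dom_has_unclosed_or_nested_brackets text → Spec_has_unclosed_or_nested_brackets text (has_unclosed_or_nested_brackets text)

-- ===== LEMMAS AND PROOFS =====

-- A's loop ignores non-bracket characters
theorem pvLoopA_filter (l : List Char) (ok : Bool) :
    pvLoopA l ok = pvLoopA (l.filter (fun c => c == '[' || c == ']')) ok := by
  induction l generalizing ok with
  | nil => rfl
  | cons c cs ih =>
    by_cases h1 : c = '['
    · subst h1; simp [pvLoopA, List.filter]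
      cases ok <;> simp [ih]
    · by_cases h2 : c = ']'
      · subst h2; simp [pvLoopA, List.filter]
        cases ok <;> simp [ih]
      · have hb : (c == '[' || c == ']') = false := by simp [h1, h2]
        simp [pvLoopA, h1, h2, hb, ih]

-- on a bracket-only list, A's loop (started open-expecting) equals B's pattern check
theorem pvKey (n : Nat) : ∀ bs : List Char, bs.length ≤ n → (∀ c ∈ bs, c = '[' ∨ c = ']') →
    pvLoopA bs true =
      (decide (bs.length % 2 = 1) ||
       decide (bs ≠ (List.replicate (bs.length / 2) ['[', ']']).flatten)) := by
  induction n with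
  | zero =>
    intro bs hlen _
    have : bs = [] := List.length_eq_zero_iff.mp (Nat.le_zero.mp hlen)
    subst this; decide
  | succ n ih =>
    intro bs hlen hall
    match bs with
    | [] => decide
    | c :: cs =>
      rcases hall c (by simp) with hc | hc
      · subst hc
        match cs with
        | [] => decide
        | c2 :: rest =>
          rcases hall c2 (by simp) with hc2 | hc2
          · -- two opens in a row: nesting; the pattern mismatches at position 1
            subst hc2
            have hA : pvLoopA ('[' :: '[' :: rest) true = true := by
              simp [pvLoopA]
            rw [hA]
            by_cases hodd : ('[' :: '[' :: rest).length % 2 = 1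
            · symm
              simp only [Bool.or_eq_true, decide_eq_true_eq]
              exact Or.inl hodd
            · have h2 : 1 ≤ ('[' :: '[' :: rest).length / 2 := by
                simp only [List.length_cons] at hodd ⊢; omega
              obtain ⟨j, hj⟩ : ∃ j, ('[' :: '[' :: rest).length / 2 = j + 1 :=
                ⟨_, (Nat.succ_pred_eq_of_pos h2).symm⟩
              rw [hj]
              simp [List.replicate_succ]
          · -- a balanced pair: both sides reduce to the rest
            subst hc2
            have hA : pvLoopA ('[' :: ']' :: rest) true = pvLoopA rest true := by
              simp [pvLoopA]
            rw [hA, ih rest (by simp at hlen ⊢; omega)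
              (fun c hc => hall c (by simp [hc]))]
            have hmod : ('[' :: ']' :: rest).length % 2 = rest.length % 2 := by
              simp only [List.length_cons]; omega
            have hdiv : ('[' :: ']' :: rest).length / 2 = rest.length / 2 + 1 := by
              simp only [List.length_cons]; omega
            rw [hmod, hdiv]
            simp [List.replicate_succ]
      · -- a close first: unmatched; the pattern mismatches at position 0
        subst hc
        have hA : pvLoopA (']' :: cs) true = true := by simp [pvLoopA]
        rw [hA]
        by_cases hodd : (']' :: cs).length % 2 = 1
        · symm
          simp only [Bool.or_eq_true, decide_eq_true_eq]
          exact Or.inl hodd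
        · have h2 : 1 ≤ (']' :: cs).length / 2 := by
            simp only [List.length_cons] at hodd ⊢; omega
          obtain ⟨j, hj⟩ : ∃ j, (']' :: cs).length / 2 = j + 1 :=
            ⟨_, (Nat.succ_pred_eq_of_pos h2).symm⟩
          rw [hj]
          simp [List.replicate_succ]

-- ===== VERDICT (by name: the statement is the Claim_ definition above) =====
theorem has_unclosed_or_nested_brackets_spec : Claim_equal_has_unclosed_or_nested_brackets := by
  intro text _
  unfold Spec_has_unclosed_or_nested_brackets has_unclosed_or_nested_brackets
    has_unclosed_or_nested_brackets_alt
  rw [pvLoopA_filter]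
  exact pvKey _ _ le_rfl (by
    intro c hc
    have := List.of_mem_filter hc
    simpa using this)
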